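-- pv_equiv track=rewrite | github.com/famano/name-divination | components.py | getTrylist
-- ===== SOURCE A (Python) =====
-- from itertools import product
--
-- def getTrylist(input_name):
--     determined = []
--     undetermined = []
--     for i, kakusu in enumerate(input_name):
--         if kakusu < 0:
--             undetermined.append(i)
--         else:
--             determined.append(i)
--
--     element_list = []
--     for index in undetermined:
--         single_list = []
--         for i in range(1,31):
--             single_list.append([index, i])
--         element_list.append(single_list)
--
--     try_list = [combination for combination in product(*element_list)]
--
--     result_list = []
--     for single_try in try_list:
--         result = list(range(len(input_name)))
--         for element in single_try:
--             result[element[0]] = element[1]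
--         for index in determined:
--             result[index] = input_name[index]
--         result_list.append(result)
--     return result_list
-- ===== SOURCE B (Python) =====
-- def getTrylist(input_name):
--     # Template recursion: preset determined positions once, then depth-first fill
--     # the undetermined positions with 1..30 (deepest = last index varies fastest),
--     # copying the template only at each leaf.
--     undetermined = [i for i, kakusu in enumerate(input_name) if kakusu < 0]
--     template = list(input_name)
--     result_list = []
--     def fill(d):
--         if d == len(undetermined):
--             result_list.append(list(template))
--             return
--         index = undetermined[d]
--         for v in range(1, 31):
--             template[index] = v
--             fill(d + 1)
--     fill(0)
--     return result_list
-- ===== Notes on version B (the rewrite author's own statement) =====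
-- stated objective: simpler
-- what changed: B replaces A's pipeline (split indices into determined/undetermined, build per-index [index,value] choice lists, itertools.product over them, then patch a range() template by indexed assignment) with a single backtracking recursion that presets determined positions once and fills undetermined positions depth-first with 1..30, copying the template only at each leaf.
import Mathlib
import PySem

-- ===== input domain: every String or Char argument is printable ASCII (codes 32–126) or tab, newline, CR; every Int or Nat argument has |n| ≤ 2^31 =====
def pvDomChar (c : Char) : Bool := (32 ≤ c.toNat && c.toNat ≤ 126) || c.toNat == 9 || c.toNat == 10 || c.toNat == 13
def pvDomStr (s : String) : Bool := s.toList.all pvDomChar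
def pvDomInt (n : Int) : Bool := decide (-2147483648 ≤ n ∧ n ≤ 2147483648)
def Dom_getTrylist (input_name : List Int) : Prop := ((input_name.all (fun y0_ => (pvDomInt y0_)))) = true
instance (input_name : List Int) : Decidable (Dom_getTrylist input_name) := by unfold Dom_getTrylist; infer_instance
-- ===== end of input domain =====

-- B replaces A's determined/undetermined index bookkeeping + itertools.product + template patching
-- with one structural recursion over the list (objective: simpler; same output on every input).

-- ===== PORT A =====
-- itertools.product(*lists): the last factor varies fastest.
def pyProduct {α : Type} : List (List α) → List (List α)
  | [] => [[]]
  | l :: ls => l.flatMap (fun x => (pyProduct ls).map (fun c => x :: c))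

def getTrylist (input_name : List Int) : List (List Int) :=
  -- first loop: split enumerate(input_name) into determined/undetermined index lists
  let du := (PySem.List.enumerate input_name 0).foldl
      (fun (acc : List Int × List Int) ik =>
        if ik.2 < 0 then (acc.1, acc.2 ++ [ik.1]) else (acc.1 ++ [ik.1], acc.2)) ([], [])
  let determined := du.1
  let undetermined := du.2
  -- second loop: element_list, one [index, i] choice list (ported as pairs) per undetermined index
  let element_list := undetermined.map
      (fun index => (PySem.List.pyRange 1 31 1).map (fun i => (index, i)))
  let try_list := pyProduct element_list
  -- third loop: build each result from list(range(len(input_name))) by indexed assignment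
  try_list.map (fun single_try =>
    let result := PySem.List.pyRange 0 (input_name.length : Int) 1
    let result := single_try.foldl (fun r e => PySem.List.pySetD r e.1 e.2) result
    let result := determined.foldl
        (fun r index => PySem.List.pySetD r index (PySem.List.pyGetD input_name index 0)) result
    result)

-- ===== PORT B =====
-- fill(d): the backtracking loop over the remaining undetermined indices; the template is
-- passed persistently (B's in-place writes are internal: each depth overwrites its own slot
-- before recursing, and the list is copied at the leaf).
def fillB : List Int → List Int → List (List Int)
  | [], template => [template]
  | index :: rest, template =>
    (PySem.List.pyRange 1 31 1).flatMap (fun v => fillB rest (PySem.List.pySetD template index v))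

def getTrylist_alt (input_name : List Int) : List (List Int) :=
  let undetermined := ((PySem.List.enumerate input_name 0).filter
      (fun p => decide (p.2 < 0))).map (fun p => p.1)
  fillB undetermined input_name

-- ===== PRECONDITION & SPEC =====
def Spec_getTrylist (input_name : List Int) (out : List (List Int)) : Prop := out = getTrylist_alt input_name
instance (input_name : List Int) (out : List (List Int)) : Decidable (Spec_getTrylist input_name out) := by unfold Spec_getTrylist; infer_instance

-- ===== CLAIM (what is proved, stated in full; the proofs are below) =====
def Claim_equal_getTrylist : Prop := ∀ (input_name : List Int), Dom_getTrylist input_name → Spec_getTrylist input_name (getTrylist input_name)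

-- ===== LEMMAS AND PROOFS =====

-- positionwise recursion both ports are proved equal to
def specRec : List Int → List (List Int)
  | [] => [[]]
  | head :: rest =>
    if head < 0 then
      (PySem.List.pyRange 1 31 1).flatMap (fun v => (specRec rest).map (fun t => v :: t))
    else
      (specRec rest).map (fun t => head :: t)

-- 0-based determined/undetermined index lists (Nat form) of a name list.
def detN : List Int → List Nat
  | [] => []
  | x :: xs => if x < 0 then (detN xs).map (· + 1) else 0 :: (detN xs).map (· + 1)

def undN : List Int → List Nat
  | [] => []
  | x :: xs => if x < 0 then 0 :: (undN xs).map (· + 1) else (undN xs).map (· + 1)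

-- the combination list A builds, with Nat indices
def CN (u : List Nat) : List (List (Nat × Int)) :=
  pyProduct (u.map (fun j => (PySem.List.pyRange 1 31 1).map (fun v => (j, v))))

-- the two assignment folds, Nat-indexed
def ACN (c : List (Nat × Int)) (b : List Int) : List Int :=
  c.foldl (fun r p => r.set p.1 p.2) b

def ADN (d : List Nat) (name : List Int) (r : List Int) : List Int :=
  d.foldl (fun r j => r.set j (name.getD j 0)) r

theorem detund_foldl (name : List Int) : ∀ (s : Int) (d u : List Int),
    (PySem.List.enumerate name s).foldl
      (fun (acc : List Int × List Int) ik =>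
        if ik.2 < 0 then (acc.1, acc.2 ++ [ik.1]) else (acc.1 ++ [ik.1], acc.2)) (d, u)
    = (d ++ (detN name).map (fun (j : Nat) => s + (j : Int)),
       u ++ (undN name).map (fun (j : Nat) => s + (j : Int))) := by
  induction name with
  | nil => intro s d u; simp [PySem.List.enumerate_nil, detN, undN]
  | cons x xs ih =>
    intro s d u
    rw [PySem.List.enumerate_cons]
    simp only [List.foldl_cons]
    by_cases hx : x < 0
    · rw [if_pos hx, ih (s+1), show detN (x :: xs) = (detN xs).map (· + 1) by simp [detN, hx],
          show undN (x :: xs) = 0 :: (undN xs).map (· + 1) by simp [undN, hx]]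
      simp only [Prod.mk.injEq, List.map_cons, List.map_map, List.append_assoc,
        List.singleton_append, Nat.cast_zero, add_zero]
      refine ⟨?_, ?_⟩ <;> · congr 1 <;>
        first
          | rfl
          | (apply List.map_congr_left; intro j _; simp only [Function.comp_apply]; push_cast; ring)
          | (congr 1; apply List.map_congr_left; intro j _; simp only [Function.comp_apply]; push_cast; ring)
    · rw [if_neg hx, ih (s+1), show detN (x :: xs) = 0 :: (detN xs).map (· + 1) by simp [detN, hx],
          show undN (x :: xs) = (undN xs).map (· + 1) by simp [undN, hx]]
      simp only [Prod.mk.injEq, List.map_cons, List.map_map, List.append_assoc,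
        List.singleton_append, Nat.cast_zero, add_zero]
      refine ⟨?_, ?_⟩ <;> · congr 1 <;>
        first
          | rfl
          | (apply List.map_congr_left; intro j _; simp only [Function.comp_apply]; push_cast; ring)
          | (congr 1; apply List.map_congr_left; intro j _; simp only [Function.comp_apply]; push_cast; ring)

theorem pyProduct_map {α β : Type} (f : α → β) : ∀ (ls : List (List α)),
    pyProduct (ls.map (List.map f)) = (pyProduct ls).map (List.map f) := by
  intro ls
  induction ls with
  | nil => simp [pyProduct]
  | cons l ls ih =>
    simp [pyProduct, ih, List.flatMap_map, List.map_flatMap, List.map_map]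
    rfl

theorem CN_cons (j : Nat) (u : List Nat) :
    CN (j :: u) = (PySem.List.pyRange 1 31 1).flatMap
      (fun v => (CN u).map (fun c => (j, v) :: c)) := by
  simp [CN, pyProduct, List.flatMap_map]

theorem CN_shift (u : List Nat) :
    CN (u.map (· + 1)) = (CN u).map (List.map (fun p => (p.1 + 1, p.2))) := by
  induction u with
  | nil => simp [CN, pyProduct]
  | cons j u ih =>
    rw [List.map_cons, CN_cons, CN_cons, ih]
    simp only [List.map_flatMap, List.map_map]
    apply List.flatMap_congr
    intro v _
    apply List.map_congr_left
    intro c _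
    simp

theorem ACN_shift : ∀ (c : List (Nat × Int)) (a : Int) (l : List Int),
    ACN (c.map (fun p => (p.1 + 1, p.2))) (a :: l) = a :: ACN c l := by
  intro c
  induction c with
  | nil => intro a l; simp [ACN]
  | cons p c ih => intro a l; simp only [List.map_cons, ACN, List.foldl_cons, List.set]; exact ih a _

theorem ADN_shift (x : Int) (xs : List Int) : ∀ (d : List Nat) (a : Int) (l : List Int),
    ADN (d.map (· + 1)) (x :: xs) (a :: l) = a :: ADN d xs l := by
  intro d
  induction d with
  | nil => intro a l; simp [ADN]
  | cons j d ih =>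
    intro a l
    simp only [List.map_cons, ADN, List.foldl_cons, List.set, List.getD_cons_succ]
    exact ih a _

theorem main_lemma : ∀ (name : List Int) (b : List Int), b.length = name.length →
    (CN (undN name)).map (fun c => ADN (detN name) name (ACN c b)) = specRec name := by
  intro name
  induction name with
  | nil =>
    intro b hb
    have : b = [] := List.eq_nil_of_length_eq_zero hb
    subst this
    simp [CN, pyProduct, undN, detN, ACN, ADN, specRec]
  | cons x xs ih =>
    intro b hb
    match b with
    | b0 :: bt =>
      have hbt : bt.length = xs.length := by simpa using hb
      by_cases hx : x < 0
      · rw [show undN (x :: xs) = 0 :: (undN xs).map (· + 1) by simp [undN, hx],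
            show detN (x :: xs) = (detN xs).map (· + 1) by simp [detN, hx],
            CN_cons, CN_shift]
        rw [List.map_flatMap]
        have : ∀ v : Int,
            (((CN (undN xs)).map (List.map (fun p : Nat × Int => (p.1 + 1, p.2)))).map
              (fun c => (0, v) :: c)).map
              (fun c => ADN ((detN xs).map (· + 1)) (x :: xs) (ACN c (b0 :: bt)))
            = (specRec xs).map (fun t => v :: t) := by
          intro v
          rw [← ih bt hbt]
          simp only [List.map_map]
          apply List.map_congr_left
          intro c _
          simp only [Function.comp_apply, ACN, List.foldl_cons, List.set]
          show ADN ((detN xs).map (· + 1)) (x :: xs) (ACN (List.map _ c) (v :: bt)) = _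
          rw [ACN_shift, ADN_shift]
          rfl
        rw [show specRec (x :: xs)
              = (PySem.List.pyRange 1 31 1).flatMap
                  (fun v => (specRec xs).map (fun t => v :: t)) by
            simp [specRec, hx]]
        apply List.flatMap_congr
        intro v _
        exact this v
      · rw [show undN (x :: xs) = (undN xs).map (· + 1) by simp [undN, hx],
            show detN (x :: xs) = 0 :: (detN xs).map (· + 1) by simp [detN, hx],
            CN_shift]
        rw [show specRec (x :: xs) = (specRec xs).map (fun t => x :: t) by
              simp [specRec, hx]]
        rw [← ih bt hbt]
        simp only [List.map_map]
        apply List.map_congr_left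
        intro c _
        simp only [Function.comp_apply]
        rw [ACN_shift]
        show ADN (0 :: (detN xs).map (· + 1)) (x :: xs) (b0 :: ACN c bt) = _
        simp only [ADN, List.foldl_cons, List.set, List.getD_cons_zero]
        rw [show ((detN xs).map (· + 1)).foldl (fun r j => r.set j ((x :: xs).getD j 0)) (x :: ACN c bt)
              = ADN ((detN xs).map (· + 1)) (x :: xs) (x :: ACN c bt) from rfl,
            ADN_shift]
        rfl

theorem undet_filter (name : List Int) : ∀ (s : Int),
    (((PySem.List.enumerate name s).filter (fun p => decide (p.2 < 0))).map (fun p => p.1))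
    = (undN name).map (fun (j : Nat) => s + (j : Int)) := by
  induction name with
  | nil => intro s; simp [PySem.List.enumerate_nil, undN]
  | cons x xs ih =>
    intro s
    rw [PySem.List.enumerate_cons]
    by_cases hx : x < 0
    · rw [show undN (x :: xs) = 0 :: (undN xs).map (· + 1) by simp [undN, hx]]
      simp only [List.filter_cons, hx, decide_true, if_true, List.map_cons, ih (s+1),
        List.map_map, Nat.cast_zero, add_zero]
      congr 1
      apply List.map_congr_left
      intro j _
      simp only [Function.comp_apply]
      push_cast
      ring
    · rw [show undN (x :: xs) = (undN xs).map (· + 1) by simp [undN, hx]]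
      simp only [List.filter_cons, hx, decide_false, Bool.false_eq_true, if_false,
        ih (s+1), List.map_map]
      apply List.map_congr_left
      intro j _
      simp only [Function.comp_apply]
      push_cast
      ring

-- fillB with Nat indices
def fillN : List Nat → List Int → List (List Int)
  | [], t => [t]
  | j :: u, t => (PySem.List.pyRange 1 31 1).flatMap (fun v => fillN u (t.set j v))

theorem fillB_cast : ∀ (u : List Nat) (t : List Int),
    fillB (u.map (fun (j : Nat) => (j : Int))) t = fillN u t := by
  intro u
  induction u with
  | nil => intro t; rfl
  | cons j u ih =>
    intro t
    simp only [List.map_cons, fillB, fillN, PySem.List.pySetD_natCast, ih]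

theorem fillN_shift : ∀ (u : List Nat) (a : Int) (l : List Int),
    fillN (u.map (· + 1)) (a :: l) = (fillN u l).map (fun t => a :: t) := by
  intro u
  induction u with
  | nil => intro a l; rfl
  | cons j u ih =>
    intro a l
    simp only [List.map_cons, fillN, List.set, ih, List.map_flatMap]

theorem fillN_spec : ∀ (name : List Int), fillN (undN name) name = specRec name := by
  intro name
  induction name with
  | nil => rfl
  | cons x xs ih =>
    by_cases hx : x < 0
    · rw [show undN (x :: xs) = 0 :: (undN xs).map (· + 1) by simp [undN, hx],
          show specRec (x :: xs)
              = (PySem.List.pyRange 1 31 1).flatMap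
                  (fun v => (specRec xs).map (fun t => v :: t)) by simp [specRec, hx]]
      rw [fillN]
      apply List.flatMap_congr
      intro v _
      rw [show (x :: xs).set 0 v = v :: xs from rfl, fillN_shift, ih]
    · rw [show undN (x :: xs) = (undN xs).map (· + 1) by simp [undN, hx],
          show specRec (x :: xs) = (specRec xs).map (fun t => x :: t) by simp [specRec, hx]]
      rw [fillN_shift, ih]

-- ===== VERDICT (by name: the statement is the Claim_ definition above) =====
theorem getTrylist_spec : Claim_equal_getTrylist := by
  intro name _
  show getTrylist name = getTrylist_alt name
  rw [getTrylist]
  simp only [detund_foldl name 0 [] [], List.nil_append, zero_add]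
  rw [show ((undN name).map (fun (j : Nat) => (j : Int))).map
        (fun index => (PySem.List.pyRange 1 31 1).map (fun i => (index, i)))
      = ((undN name).map (fun j => (PySem.List.pyRange 1 31 1).map (fun v => (j, v)))).map
          (List.map (fun p : Nat × Int => ((p.1 : Int), p.2))) by
    simp [List.map_map]]
  rw [pyProduct_map]
  rw [show getTrylist_alt name = specRec name by
        rw [getTrylist_alt]
        rw [undet_filter name 0]
        simp only [zero_add]
        rw [fillB_cast, fillN_spec]]
  rw [← main_lemma name (PySem.List.pyRange 0 (name.length : Int) 1)
        (by simp [PySem.List.length_pyRange_one])]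
  simp only [List.map_map]
  apply List.map_congr_left
  intro c _
  simp only [Function.comp_apply, List.foldl_map, PySem.List.pySetD_natCast,
    PySem.List.pyGetD_natCast]
  rfl
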